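-- pv_equiv track=rewrite | github.com/asdfff383/Practical_Thorey | program1.py | is_accepted_by_dfa
-- ===== SOURCE A (Python) =====
-- def is_accepted_by_dfa(binary_string):
--     # DFA states: 0 (mod 3 == 0), 1 (mod 3 == 1), 2 (mod 3 == 2)
--     state = 0  # Start in state 0
--
--     for bit in binary_string:
--         if bit not in '01':
--             return False  # Reject non-binary strings
--         if bit == '1':
--             state = (state + 1) % 3
--         # bit == '0' -> state remains the same
--
--     return state == 0  # Accept only if final state is 0
-- ===== SOURCE B (Python) =====
-- def is_accepted_by_dfa(binary_string):
--     if not all(c in '01' for c in binary_string):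
--         return False
--     return binary_string.count('1') % 3 == 0
-- ===== Notes on version B (the rewrite author's own statement) =====
-- stated objective: simpler
-- what changed: Replaces the incremental mod-3 DFA state loop with a validate-all pass followed by a library count of set bits taken mod 3.
import Mathlib
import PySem

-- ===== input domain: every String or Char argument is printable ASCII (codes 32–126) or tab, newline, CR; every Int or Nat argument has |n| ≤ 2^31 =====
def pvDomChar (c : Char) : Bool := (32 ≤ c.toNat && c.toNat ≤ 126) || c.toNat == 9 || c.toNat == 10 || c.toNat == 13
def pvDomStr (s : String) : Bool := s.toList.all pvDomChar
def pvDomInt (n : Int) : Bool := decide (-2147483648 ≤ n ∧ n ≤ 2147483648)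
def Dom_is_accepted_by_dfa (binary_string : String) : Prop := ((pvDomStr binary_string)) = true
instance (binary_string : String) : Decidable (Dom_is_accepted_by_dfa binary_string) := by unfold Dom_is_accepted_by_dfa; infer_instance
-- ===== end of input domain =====

-- B replaces A's incremental mod-3 DFA state loop with a validate-all pass plus a library count of '1's taken mod 3 (objective: simpler).

-- ===== PORT A =====
-- the DFA loop: early return False on a non-binary char, else advance the mod-3 state
def pvDfaLoop : List Char → Int → Bool
  | [], state => state == 0
  | bit :: rest, state =>
    if !(bit == '0' || bit == '1') then false
    else if bit == '1' then pvDfaLoop rest (PySem.Int.mod (state + 1) 3)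
    else pvDfaLoop rest state

def is_accepted_by_dfa (binary_string : String) : Bool :=
  pvDfaLoop binary_string.toList 0

-- ===== PORT B =====
def is_accepted_by_dfa_alt (binary_string : String) : Bool :=
  if !(binary_string.toList.all (fun c => c == '0' || c == '1')) then false
  else PySem.Int.mod (binary_string.toList.count '1' : Int) 3 == 0

-- ===== PRECONDITION & SPEC =====
def Spec_is_accepted_by_dfa (binary_string : String) (out : Bool) : Prop := out = is_accepted_by_dfa_alt binary_string
instance (binary_string : String) (out : Bool) : Decidable (Spec_is_accepted_by_dfa binary_string out) := by unfold Spec_is_accepted_by_dfa; infer_instance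

-- ===== CLAIM (what is proved, stated in full; the proofs are below) =====
def Claim_equal_is_accepted_by_dfa : Prop := ∀ (binary_string : String), Dom_is_accepted_by_dfa binary_string → Spec_is_accepted_by_dfa binary_string (is_accepted_by_dfa binary_string)

-- ===== LEMMAS AND PROOFS =====

-- loop invariant: A's loop from state s (0 ≤ s < 3) decides validity, and on valid input tests (s + #1s) mod 3 = 0
lemma pvDfaLoop_eq (l : List Char) : ∀ state : Int, 0 ≤ state → state < 3 →
    pvDfaLoop l state =
      (if l.all (fun c => c == '0' || c == '1')
       then (PySem.Int.mod (state + (l.count '1' : Int)) 3 == 0) else false) := by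
  induction l with
  | nil =>
    intro state h0 h3
    simp only [pvDfaLoop, List.all_nil, List.count_nil, if_true, Int.natCast_zero, add_zero]
    rw [PySem.Int.mod_eq_emod_of_pos (by norm_num), Int.emod_eq_of_lt h0 h3]
  | cons bit rest ih =>
    intro state h0 h3
    by_cases hv : (bit == '0' || bit == '1') = true
    · simp only [pvDfaLoop, hv, Bool.not_true, List.all_cons, Bool.true_and,
        show (false = true) = False by simp, if_false]
      by_cases h1 : bit = '1'
      · subst h1
        rw [if_pos (by simp),
            ih _ (PySem.Int.mod_nonneg _ (by norm_num)) (PySem.Int.mod_lt _ (by norm_num))]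
        have harith : PySem.Int.mod (PySem.Int.mod (state + 1) 3 + (rest.count '1' : Int)) 3
            = PySem.Int.mod (state + (('1' :: rest).count '1' : Int)) 3 := by
          simp only [PySem.Int.mod_eq_emod_of_pos (show (0:Int) < 3 by norm_num),
            List.count_cons_self]
          push_cast
          omega
        rw [harith]
      · rw [if_neg (by simp [h1]), ih _ h0 h3, List.count_cons_of_ne (by simpa using h1)]
    · simp only [pvDfaLoop, hv, Bool.not_false, List.all_cons]
      simp

-- ===== VERDICT (by name: the statement is the Claim_ definition above) =====
theorem is_accepted_by_dfa_spec : Claim_equal_is_accepted_by_dfa := by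
  intro s _
  unfold Spec_is_accepted_by_dfa is_accepted_by_dfa is_accepted_by_dfa_alt
  rw [pvDfaLoop_eq _ 0 le_rfl (by norm_num)]
  by_cases hv : ∀ x ∈ s.toList, x = '0' ∨ x = '1'
  · have h2 : ¬ ∃ x ∈ s.toList, ¬x = '0' ∧ ¬x = '1' := by
      rintro ⟨x, hx, hx0, hx1⟩
      rcases hv x hx with h | h
      · exact hx0 h
      · exact hx1 h
    simp [h2]
    exact fun _ => hv
  · push Not at hv
    obtain ⟨x, hx, hx0, hx1⟩ := hv
    simp only [List.all_eq_true]
    rw [if_neg (by push Not; exact ⟨x, hx, by simp [hx0, hx1]⟩),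
        if_pos (by simp; exact ⟨x, hx, by simp [hx0, hx1]⟩)]
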